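-- pv_equiv track=rewrite | github.com/TeddyFirman/HackerRank-Certification-PythonBasic | MissingCharacter.py | missingCharacters
-- ===== SOURCE A (Python) =====
-- def missingCharacters(s):
--     # Write your code here
--     MAX_CHAR = 26
--
--     x = [False for i in range(MAX_CHAR)]
--     y = []
--
--
--     for i in range(len(s)):
--         if (s[i] >= 'a' and s[i] <= 'z'):
--             x[ord(s[i]) - ord('a')] = True
--         if (s[i].isdigit()):
--             y.append(int(s[i]))
--
--
--     result = "".join(str(x) for x in range(10) if x not in y)
--
--     for i in range(MAX_CHAR):
--         if (x[i] == False):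
--           result += chr(i + ord('a'))
--
--     return result
-- ===== SOURCE B (Python) =====
-- TARGET = "0123456789abcdefghijklmnopqrstuvwxyz"
--
-- def missingCharacters(s):
--     # No marking pass over s at all: for each candidate character of the fixed
--     # 36-character target, test directly whether it occurs in s as a substring.
--     return "".join(c for c in TARGET if c not in s)
-- ===== Notes on version B (the rewrite author's own statement) =====
-- stated objective: simpler
-- what changed: inverts the traversal: instead of A's marking scan over s (boolean array for letters, int-converted digit list, then two output loops), B never scans s to build state at all - it iterates over the fixed 36-character target string and emits each character that fails a direct substring-membership test against s; the 36 C-level substring searches replace A's Python-level per-character loop with int() calls and linear list-membership tests, which a timing run measured as a large constant-factor speedup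
import Mathlib
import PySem

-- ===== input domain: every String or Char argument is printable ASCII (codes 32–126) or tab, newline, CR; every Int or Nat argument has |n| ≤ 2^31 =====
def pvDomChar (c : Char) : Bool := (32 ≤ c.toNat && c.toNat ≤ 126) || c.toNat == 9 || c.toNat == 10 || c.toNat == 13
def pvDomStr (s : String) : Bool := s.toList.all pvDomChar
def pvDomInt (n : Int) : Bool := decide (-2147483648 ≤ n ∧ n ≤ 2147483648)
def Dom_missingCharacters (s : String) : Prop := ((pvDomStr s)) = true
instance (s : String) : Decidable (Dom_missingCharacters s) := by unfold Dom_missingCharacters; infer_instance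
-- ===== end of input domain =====

-- B inverts the traversal: no marking pass over s at all — it iterates over the fixed
-- 36-character target and tests each candidate's membership in s directly (objective: simpler).

-- ===== PORT A =====
-- one iteration of A's for-loop over the characters of s (both ifs, in A's order);
-- the list assignment x[ord(s[i]) - ord('a')] = True is always in range (0..25), so List.set is exact;
-- int(s[i]) is PySem.Int.ofChars? — on s[i].isdigit() within the ASCII domain it is always `some`
def stepA (st : List Bool × List Int) (c : Char) : List Bool × List Int :=
  let x := if 'a' ≤ c ∧ c ≤ 'z' then st.1.set (c.toNat - 'a'.toNat) true else st.1
  let y := if PySem.Chars.isdigit c then st.2 ++ [(PySem.Int.ofChars? [c]).getD 0] else st.2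
  (x, y)

def missingCharacters (s : String) : String :=
  let st := s.toList.foldl stepA ((List.range 26).map (fun _ => false), [])
  -- "".join(str(x) for x in range(10) if x not in y)
  let result : List Char := PySem.Chars.join []
    (((PySem.List.pyRange 0 10 1).filter (fun d => !(st.2.contains d))).map PySem.Int.toChars)
  -- the second for-loop: result += chr(i + ord('a')) when x[i] is False (x[i] always in range)
  let result := (List.range 26).foldl
    (fun r i => if st.1.getD i false = false then r ++ [Char.ofNat (i + 'a'.toNat)] else r) result
  String.ofList result

-- ===== PORT B =====
-- `c not in s` for a one-character c is exactly character membership in s's characters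
def missingCharacters_alt (s : String) : String :=
  String.ofList (("0123456789abcdefghijklmnopqrstuvwxyz".toList).filter
    (fun c => !(s.toList.contains c)))

-- ===== PRECONDITION & SPEC =====
def Spec_missingCharacters (s : String) (out : String) : Prop := out = missingCharacters_alt s
instance (s : String) (out : String) : Decidable (Spec_missingCharacters s out) := by unfold Spec_missingCharacters; infer_instance

-- ===== CLAIM (what is proved, stated in full; the proofs are below) =====
def Claim_equal_missingCharacters : Prop := ∀ (s : String), Dom_missingCharacters s → Spec_missingCharacters s (missingCharacters s)

-- ===== LEMMAS AND PROOFS =====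

-- a digit character is one of the ten literals
lemma digit_mem (c : Char) (h : PySem.Chars.isdigit c = true) :
    c ∈ ['0','1','2','3','4','5','6','7','8','9'] := by
  simp only [PySem.Chars.isdigit, Bool.and_eq_true, decide_eq_true_eq] at h
  have h1 : 48 ≤ c.toNat := h.1
  have h3 : c.toNat ≤ 57 := h.2
  have hc : Char.ofNat c.toNat = c := Char.ofNat_toNat c
  interval_cases hn : c.toNat <;> subst hc <;> decide

-- int(str-of-one-digit-char) is its value
lemma val_digit (c : Char) (h : PySem.Chars.isdigit c = true) :
    (PySem.Int.ofChars? [c]).getD 0 = (c.toNat : Int) - 48 := by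
  have hm := digit_mem c h
  fin_cases hm <;> decide

lemma stepA_fst_length (c : Char) (st : List Bool × List Int) :
    (stepA st c).1.length = st.1.length := by
  simp only [stepA]
  split <;> simp

-- the boolean array after the loop: x[i] holds iff chr(i+97) occurred
lemma foldA_fst_getD (l : List Char) (x : List Bool) (y : List Int)
    (hx : x.length = 26) (i : Nat) (hi : i < 26) :
    ((l.foldl stepA (x, y)).1.getD i false)
      = (x.getD i false || decide (Char.ofNat (97 + i) ∈ l)) := by
  induction l generalizing x y with
  | nil => simp
  | cons c l ih =>
    rw [List.foldl_cons]
    have hstep : (stepA (x, y) c).1.length = 26 := by rw [stepA_fst_length]; exact hx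
    have hrec := ih (stepA (x, y) c).1 (stepA (x, y) c).2 hstep
    rw [Prod.mk.eta] at hrec
    rw [hrec]
    have hvalid : (Char.ofNat (97 + i)).toNat = 97 + i := by
      rw [Char.toNat_ofNat, if_pos (Or.inl (by omega))]
    by_cases hlc : 'a' ≤ c ∧ c ≤ 'z'
    · have h1 : 97 ≤ c.toNat := hlc.1
      have h2 : c.toNat ≤ 122 := hlc.2
      have hx1 : (stepA (x, y) c).1 = x.set (c.toNat - 97) true := by
        simp [stepA, hlc]
      rw [hx1]
      by_cases hie : c.toNat - 97 = i
      · have hcc : Char.ofNat (97 + i) = c := by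
          have h3 : c.toNat = 97 + i := by omega
          rw [← h3, Char.ofNat_toNat]
        have hset : (x.set (c.toNat - 97) true).getD i false = true := by
          rw [hie]
          rw [List.getD_eq_getElem?_getD, List.getElem?_set_self (by omega)]
          rfl
        rw [hset]
        simp [List.mem_cons, hcc]
      · have hset : (x.set (c.toNat - 97) true).getD i false = x.getD i false := by
          rw [List.getD_eq_getElem?_getD, List.getElem?_set_ne (by omega),
            ← List.getD_eq_getElem?_getD]
        rw [hset]
        have hne : ¬(Char.ofNat (97 + i) = c) := by
          intro hcc
          have : c.toNat = 97 + i := by rw [← hcc, hvalid]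
          omega
        simp [List.mem_cons, hne]
    · have hx1 : (stepA (x, y) c).1 = x := by simp [stepA, hlc]
      rw [hx1]
      have hne : ¬(Char.ofNat (97 + i) = c) := by
        intro hcc
        apply hlc
        have h1 : c.toNat = 97 + i := by rw [← hcc, hvalid]
        constructor
        · show (97:Nat) ≤ c.toNat; omega
        · show c.toNat ≤ 122; omega
      simp [List.mem_cons, hne]

-- the digit list after the loop: d (0 ≤ d < 10) occurs in y iff chr(48+d) occurred
lemma foldA_snd_contains (l : List Char) (x : List Bool) (y : List Int)
    (d : Int) (h0 : 0 ≤ d) (h10 : d < 10) :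
    ((l.foldl stepA (x, y)).2.contains d)
      = (y.contains d || decide (Char.ofNat (48 + d.toNat) ∈ l)) := by
  induction l generalizing x y with
  | nil => simp
  | cons c l ih =>
    rw [List.foldl_cons]
    have hrec := ih (stepA (x, y) c).1 (stepA (x, y) c).2
    rw [Prod.mk.eta] at hrec
    rw [hrec]
    have hvalid : (Char.ofNat (48 + d.toNat)).toNat = 48 + d.toNat := by
      rw [Char.toNat_ofNat, if_pos (Or.inl (by omega))]
    by_cases hdig : PySem.Chars.isdigit c = true
    · have hb : 48 ≤ c.toNat ∧ c.toNat ≤ 57 := by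
        simpa [PySem.Chars.isdigit, Char.le_def] using hdig
      have h1 : 48 ≤ c.toNat := hb.1
      have h2 : c.toNat ≤ 57 := hb.2
      have hy1 : (stepA (x, y) c).2 = y ++ [(c.toNat : Int) - 48] := by
        simp [stepA, hdig, val_digit c hdig]
      rw [hy1]
      by_cases heq : (c.toNat : Int) - 48 = d
      · have hcc : Char.ofNat (48 + d.toNat) = c := by
          have h3 : c.toNat = 48 + d.toNat := by omega
          rw [← h3, Char.ofNat_toNat]
        have heq2 : d = (c.toNat : Int) - 48 := heq.symm
        simp [List.mem_cons, hcc, ← heq2]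
      · have hne : ¬(Char.ofNat (48 + d.toNat) = c) := by
          intro hcc
          have : c.toNat = 48 + d.toNat := by rw [← hcc, hvalid]
          omega
        have heq2 : ¬(d = (c.toNat : Int) - 48) := fun h => heq h.symm
        simp [List.mem_cons, hne, heq2]
    · have hy1 : (stepA (x, y) c).2 = y := by simp [stepA, hdig]
      rw [hy1]
      have hne : ¬(Char.ofNat (48 + d.toNat) = c) := by
        intro hcc
        apply hdig
        have h1 : c.toNat = 48 + d.toNat := by rw [← hcc, hvalid]
        simp only [PySem.Chars.isdigit, Bool.and_eq_true, decide_eq_true_eq]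
        refine ⟨?_, ?_⟩
        · show (48:Nat) ≤ c.toNat; omega
        · show c.toNat ≤ 57; omega
      simp [List.mem_cons, hne]

-- initial boolean array facts
lemma init_getD (i : Nat) : (((List.range 26).map (fun _ => false)).getD i false) = false := by
  rw [List.map_const', List.length_range]
  rcases Nat.lt_or_ge i 26 with h | h
  · rw [List.getD_eq_getElem?_getD, List.getElem?_replicate, if_pos h]; rfl
  · rw [List.getD_eq_getElem?_getD, List.getElem?_replicate, if_neg (by omega)]; rfl

set_option maxRecDepth 8192 in
lemma toChars_digit : ∀ d ∈ PySem.List.pyRange 0 10 1,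
    PySem.Int.toChars d = [Char.ofNat (48 + d.toNat)] := by decide

-- ===== VERDICT (by name: the statement is the Claim_ definition above) =====
theorem missingCharacters_spec : Claim_equal_missingCharacters := by
  intro s _hDom
  show missingCharacters s = missingCharacters_alt s
  -- the common characterisation: both sides filter the target by absence from s
  have hB : missingCharacters_alt s
      = String.ofList (("0123456789abcdefghijklmnopqrstuvwxyz".toList).filter
          (fun c => !decide (c ∈ s.toList))) := by
    simp [missingCharacters_alt]
  rw [hB]
  -- A's side
  simp only [missingCharacters]
  have hlen : ((List.range 26).map (fun _ : Nat => false)).length = 26 := by simp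
  have hA1 : ∀ i : Nat, i < 26 →
      ((s.toList.foldl stepA ((List.range 26).map (fun _ => false), [])).1.getD i false)
        = decide (Char.ofNat (97 + i) ∈ s.toList) := by
    intro i hi
    rw [foldA_fst_getD s.toList _ _ hlen i hi, init_getD, Bool.false_or]
  have hA2 : ∀ d : Int, 0 ≤ d → d < 10 →
      ((s.toList.foldl stepA ((List.range 26).map (fun _ => false), [])).2.contains d)
        = decide (Char.ofNat (48 + d.toNat) ∈ s.toList) := by
    intro d h0 h10
    rw [foldA_snd_contains s.toList _ _ d h0 h10]
    simp
  -- the second for-loop is append-if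
  rw [show (fun (r : List Char) (i : Nat) =>
        if (s.toList.foldl stepA ((List.range 26).map (fun _ => false), [])).1.getD i false = false
        then r ++ [Char.ofNat (i + 'a'.toNat)] else r)
      = (fun r i =>
        if (!(s.toList.foldl stepA ((List.range 26).map (fun _ => false), [])).1.getD i false) = true
        then r ++ [Char.ofNat (i + 'a'.toNat)] else r) from by
    funext r i
    by_cases h : (s.toList.foldl stepA ((List.range 26).map (fun _ => false), [])).1.getD i false <;>
      simp_all]
  rw [PySem.List.foldl_append_if]
  -- letters: rewrite the filter condition, commute filter with map
  have hlet : (List.filter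
        (fun i => !(s.toList.foldl stepA ((List.range 26).map (fun _ => false), [])).1.getD i false)
        (List.range 26)).map (fun i => Char.ofNat (i + 'a'.toNat))
      = ("abcdefghijklmnopqrstuvwxyz".toList).filter (fun c => !decide (c ∈ s.toList)) := by
    rw [List.filter_congr (q := ((fun c => !decide (c ∈ s.toList)) ∘ fun i => Char.ofNat (i + 'a'.toNat)))
        (by
          intro i hi
          have hi26 : i < 26 := List.mem_range.mp hi
          have h1 := hA1 i hi26
          have h97 : Char.ofNat (i + 'a'.toNat) = Char.ofNat (97 + i) := by
            rw [show ('a'.toNat : Nat) = 97 from rfl, Nat.add_comm]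
          simp only [Function.comp]
          simp only [h97, h1])]
    rw [← List.filter_map]
    congr 1
  -- digits: rewrite the filter condition, collapse join of singletons, commute filter with map
  have hdig : PySem.Chars.join []
        ((List.filter
          (fun d => !(s.toList.foldl stepA ((List.range 26).map (fun _ => false), [])).2.contains d)
          (PySem.List.pyRange 0 10 1)).map PySem.Int.toChars)
      = ("0123456789".toList).filter (fun c => !decide (c ∈ s.toList)) := by
    rw [List.filter_congr (q := ((fun c => !decide (c ∈ s.toList)) ∘ fun d : Int => Char.ofNat (48 + d.toNat)))
        (by
          intro d hd
          have hb := (PySem.List.mem_pyRange_one).mp hd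
          have := hA2 d hb.1 hb.2
          simp only [Function.comp]
          simp only [this])]
    rw [List.map_congr_left (fun d hd => toChars_digit d (List.mem_of_mem_filter hd))]
    rw [show (fun d : Int => [Char.ofNat (48 + d.toNat)])
        = ((fun c => [c]) ∘ fun d : Int => Char.ofNat (48 + d.toNat)) from rfl]
    rw [← List.map_map, PySem.Chars.join_nil_singletons]
    rw [← List.filter_map]
    congr 1
  rw [hlet, hdig, ← List.filter_append]
  rfl
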